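-- pv_equiv track=rewrite | github.com/Valletraz/hello-world | krestiki_noliki.py | check_coordinates
-- ===== SOURCE A (Python) =====
-- def check_coordinates(check_coord, check_map):
--     _mar1 = False
--     _mar2 = False
--     # проверка на допустимый диапазон координат
--     correct_coordinates = ["00", "01", "02", "10", "11", "12", "20", "21", "22"]
--     for c in correct_coordinates:
--         if c == check_coord:
--             _mar1 = True
--     # проверка не занято ли это поле
--     if _mar1:
--         if check_map[check_coord] == "-":
--             _mar2 = True
--     return _mar1 and _mar2
-- ===== SOURCE B (Python) =====
-- def check_coordinates(check_coord, check_map):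
--     # lookup-first via dict.get (no KeyError), then validate by numeric parse
--     if check_map.get(check_coord) != "-":
--         return False
--     if len(check_coord) != 2 or not check_coord.isdigit():
--         return False
--     n = int(check_coord)
--     return n // 10 <= 2 and n % 10 <= 2
-- ===== Notes on version B (the rewrite author's own statement) =====
-- stated objective: alternative
-- what changed: Inverts the control flow (board lookup first via dict.get, returning early when the cell is not '-') and replaces the scan over the hard-coded list of nine coordinate strings with a numeric validity test: parse the string with int() after an isdigit/length guard and check both digits via n // 10 and n % 10.
import Mathlib
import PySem

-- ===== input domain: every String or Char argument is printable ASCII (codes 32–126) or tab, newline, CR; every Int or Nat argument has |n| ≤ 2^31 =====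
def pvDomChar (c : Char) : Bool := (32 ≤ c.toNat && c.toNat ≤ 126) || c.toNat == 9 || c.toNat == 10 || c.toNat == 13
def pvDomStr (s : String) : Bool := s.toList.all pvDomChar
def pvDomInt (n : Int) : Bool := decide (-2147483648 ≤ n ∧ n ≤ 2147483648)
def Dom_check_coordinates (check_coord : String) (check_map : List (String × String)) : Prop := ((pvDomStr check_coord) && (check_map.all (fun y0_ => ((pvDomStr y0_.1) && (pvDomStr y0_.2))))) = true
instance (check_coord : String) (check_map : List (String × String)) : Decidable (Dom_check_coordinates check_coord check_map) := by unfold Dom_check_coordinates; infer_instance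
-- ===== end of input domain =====

-- B inverts the flow (board lookup first via dict.get, so no KeyError) and replaces A's
-- scan over the nine hard-coded coordinate strings with a numeric parse (int() after an
-- isdigit/length guard, then n // 10 ≤ 2 and n % 10 ≤ 2); alternative, same cost.


-- ===== PORT A =====
-- dict lookup check_map[check_coord] = first match in the association list;
-- the KeyError case (key absent) is excluded by Pre_ and never reached there.
def check_coordinates (check_coord : String) (check_map : List (String × String)) : Bool :=
  let mar1 := (["00", "01", "02", "10", "11", "12", "20", "21", "22"].foldl
      (fun acc c => if c == check_coord then true else acc) false)
  let mar2 :=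
    if mar1 then
      (((check_map.find? (fun p => p.1 == check_coord)).map Prod.snd).getD "") == "-"
    else false
  mar1 && mar2

-- ===== PORT B =====
-- check_map.get(check_coord) = first match as an Option (none when absent, never raises);
-- int(check_coord) = PySem.Int.ofStr? (the none branch is unreachable after isdigit).
def check_coordinates_alt (check_coord : String) (check_map : List (String × String)) : Bool :=
  let got : Option String := (check_map.find? (fun p => p.1 == check_coord)).map Prod.snd
  if got != some "-" then false
  else if PySem.Str.len check_coord != 2 || !(PySem.Str.strIsdigit check_coord) then false
  else
    match PySem.Int.ofStr? check_coord with
    | some n => decide (PySem.Int.floordiv n 10 ≤ 2) && decide (PySem.Int.mod n 10 ≤ 2)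
    | none => false

-- ===== PRECONDITION & SPEC =====
-- Pre_ excludes only the inputs on which the Python A raises KeyError:
-- a valid coordinate whose key is absent from check_map.
def Pre_check_coordinates (check_coord : String) (check_map : List (String × String)) : Prop :=
  check_coord ∈ ["00", "01", "02", "10", "11", "12", "20", "21", "22"] →
    (check_map.find? (fun p => p.1 == check_coord)).isSome

instance (check_coord : String) (check_map : List (String × String)) : Decidable (Pre_check_coordinates check_coord check_map) := by unfold Pre_check_coordinates; infer_instance

def pvWitness_check_coordinates : String × (List (String × String)) := ("11", [("11", "-"), ("00", "x")])

def Spec_check_coordinates (check_coord : String) (check_map : List (String × String)) (out : Bool) : Prop := out = check_coordinates_alt check_coord check_map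
instance (check_coord : String) (check_map : List (String × String)) (out : Bool) : Decidable (Spec_check_coordinates check_coord check_map out) := by unfold Spec_check_coordinates; infer_instance

-- ===== CLAIM (what is proved, stated in full; the proofs are below) =====
def Claim_equal_check_coordinates : Prop := ∀ (check_coord : String) (check_map : List (String × String)), Dom_check_coordinates check_coord check_map → Pre_check_coordinates check_coord check_map → Spec_check_coordinates check_coord check_map (check_coordinates check_coord check_map)


-- ===== LEMMAS AND PROOFS =====

theorem pv_toList_inj {s t : String} (h : s.toList = t.toList) : s = t := by
  have := congrArg String.ofList h
  simpa using this

-- A's fold over the nine strings, characterised by the two characters of the input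
theorem pv_mar1_eq (cc : String) :
    (["00", "01", "02", "10", "11", "12", "20", "21", "22"].foldl
      (fun acc c => if c == cc then true else acc) false)
    = (match cc.toList with
       | [a, b] => ['0', '1', '2'].contains a && ['0', '1', '2'].contains b
       | _ => false) := by
  have key : ∀ (s : String) (l : List Char), s.toList = l → ((s = cc) ↔ cc.toList = l) := by
    intro s l hs
    constructor
    · rintro rfl; exact hs
    · intro h; exact pv_toList_inj (hs.trans h.symm)
  simp only [List.foldl, beq_iff_eq]
  rw [if_congr (key "00" ['0','0'] rfl) rfl rfl, if_congr (key "01" ['0','1'] rfl) rfl rfl,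
      if_congr (key "02" ['0','2'] rfl) rfl rfl, if_congr (key "10" ['1','0'] rfl) rfl rfl,
      if_congr (key "11" ['1','1'] rfl) rfl rfl, if_congr (key "12" ['1','2'] rfl) rfl rfl,
      if_congr (key "20" ['2','0'] rfl) rfl rfl, if_congr (key "21" ['2','1'] rfl) rfl rfl,
      if_congr (key "22" ['2','2'] rfl) rfl rfl]
  rcases h : cc.toList with _ | ⟨a, _ | ⟨b, _ | ⟨c, t⟩⟩⟩ <;> simp
  by_cases h1 : a = '0' <;> by_cases h2 : a = '1' <;> by_cases h3 : a = '2' <;>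
    by_cases h4 : b = '0' <;> by_cases h5 : b = '1' <;> by_cases h6 : b = '2' <;>
    simp_all

theorem pv_digit_mem {a : Char} (h : PySem.Chars.isdigit a = true) :
    a ∈ ['0','1','2','3','4','5','6','7','8','9'] := by
  simp [PySem.Chars.isdigit, Char.le_def, UInt32.le_iff_toNat_le] at h
  obtain ⟨h1, h2⟩ := h
  have hv : a.toNat = 48 ∨ a.toNat = 49 ∨ a.toNat = 50 ∨ a.toNat = 51 ∨ a.toNat = 52 ∨
      a.toNat = 53 ∨ a.toNat = 54 ∨ a.toNat = 55 ∨ a.toNat = 56 ∨ a.toNat = 57 := by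
    unfold Char.toNat at *; omega
  have key : ∀ n : Nat, a.toNat = n → a = Char.ofNat n := by
    intro n hn; subst hn; exact (Char.ofNat_toNat a).symm
  rcases hv with h|h|h|h|h|h|h|h|h|h <;> rw [key _ h] <;> decide

-- the two validity tests agree on any pair of digit characters (finite check)
theorem pv_enum {a b : Char} (ha : a ∈ ['0','1','2','3','4','5','6','7','8','9'])
    (hb : b ∈ ['0','1','2','3','4','5','6','7','8','9']) :
    ((['0','1','2'].contains a && ['0','1','2'].contains b) =
      ((PySem.Chars.strIsdigit [a,b]) &&
        (match PySem.Int.ofChars? [a,b] with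
         | some n => decide (PySem.Int.floordiv n 10 ≤ 2) && decide (PySem.Int.mod n 10 ≤ 2)
         | none => false))) := by
  fin_cases ha <;> fin_cases hb <;> decide

-- membership in the nine coordinates = B's length/isdigit/numeric test, at char level
theorem pv_valid_chars (l : List Char) :
    (match l with
     | [a, b] => ['0','1','2'].contains a && ['0','1','2'].contains b
     | _ => false)
    = (!((l.length : Int) != 2 || !(PySem.Chars.strIsdigit l)) &&
       (match PySem.Int.ofChars? l with
        | some n => decide (PySem.Int.floordiv n 10 ≤ 2) && decide (PySem.Int.mod n 10 ≤ 2)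
        | none => false)) := by
  rcases l with _ | ⟨a, _ | ⟨b, _ | ⟨c, t⟩⟩⟩
  · decide
  · simp
  · dsimp only
    by_cases hda : PySem.Chars.isdigit a = true
    · by_cases hdb : PySem.Chars.isdigit b = true
      · have h := pv_enum (pv_digit_mem hda) (pv_digit_mem hdb)
        rw [h]
        simp [PySem.Chars.strIsdigit]
      · simp [PySem.Chars.strIsdigit, Bool.eq_false_iff.mpr hdb]
        exact fun _ => ⟨fun e => hdb (by subst e; decide), fun e => hdb (by subst e; decide),
          fun e => hdb (by subst e; decide)⟩
    · simp [PySem.Chars.strIsdigit, Bool.eq_false_iff.mpr hda]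
      rintro (rfl | rfl | rfl) <;> exact absurd (by decide) hda
  · simp
    intro h
    exfalso
    omega

-- ===== VERDICT (by name: the statement is the Claim_ definition above) =====
theorem check_coordinates_spec : Claim_equal_check_coordinates := by
  intro cc cm _ _
  unfold Spec_check_coordinates check_coordinates check_coordinates_alt
  rw [pv_mar1_eq, pv_valid_chars]
  rcases h : (cm.find? (fun p => p.1 == cc)).map Prod.snd with _ | v
  · simp [h]
  · by_cases hv : v = "-"
    · subst hv
      simp [h, PySem.Str.len, PySem.Str.strIsdigit, PySem.Int.ofStr?]
    · simp [h, hv]
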